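-- pv_equiv track=rewrite | github.com/jnzhihuoo1/GNNLens | server/gnn_server/rule_mining.py | constructDegreeList
-- ===== SOURCE A (Python) =====
-- def constructDegreeList(neighbor_set, total_node_num):
--     degree_list = []
--     for i in range(total_node_num):
--         if i in neighbor_set:
--             degree = len(neighbor_set[i])
--             degree_list.append(degree)
--         else:
--             degree_list.append(0)
--     return degree_list
-- ===== SOURCE B (Python) =====
-- def constructDegreeList(neighbor_set, total_node_num):
--     degree_list = [0] * total_node_num
--     for k, v in neighbor_set.items():
--         if 0 <= k < total_node_num:
--             degree_list[k] = len(v)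
--     return degree_list
-- ===== Notes on version B (the rewrite author's own statement) =====
-- stated objective: alternative
-- what changed: Replaces the gather loop over range(total_node_num) with its per-index dict membership test and lookup by a preallocated [0]*n array into which the dict's items are scattered once (with a range guard on the key); same asymptotic cost.
import Mathlib
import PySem

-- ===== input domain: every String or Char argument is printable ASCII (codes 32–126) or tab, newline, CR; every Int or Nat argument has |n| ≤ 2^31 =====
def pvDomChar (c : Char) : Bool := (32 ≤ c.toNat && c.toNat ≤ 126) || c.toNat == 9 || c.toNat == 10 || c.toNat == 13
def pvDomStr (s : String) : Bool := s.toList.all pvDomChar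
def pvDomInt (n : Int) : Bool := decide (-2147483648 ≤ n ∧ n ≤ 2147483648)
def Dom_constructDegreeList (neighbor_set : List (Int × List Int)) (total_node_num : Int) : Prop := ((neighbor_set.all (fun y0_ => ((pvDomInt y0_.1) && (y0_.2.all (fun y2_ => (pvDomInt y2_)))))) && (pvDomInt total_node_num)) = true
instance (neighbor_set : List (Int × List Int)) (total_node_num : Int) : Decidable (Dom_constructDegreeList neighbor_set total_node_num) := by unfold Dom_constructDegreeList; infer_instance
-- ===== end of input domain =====

-- B scatters the dict's items into a preallocated [0]*n array instead of gathering with a per-index membership test (a different decomposition of the same-cost task).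


-- ===== PORT A =====
-- for i in range(total_node_num): append len(neighbor_set[i]) if i in neighbor_set else 0
def constructDegreeList (neighbor_set : List (Int × List Int)) (total_node_num : Int) : List Int :=
  (PySem.List.pyRange 0 total_node_num 1).foldl
    (fun degree_list i =>
      if (PySem.Dict.mk neighbor_set).contains i then
        degree_list ++ [((((PySem.Dict.mk neighbor_set).get? i).getD []).length : Int)]
      else
        degree_list ++ [0])
    []

-- ===== PORT B =====
-- degree_list = [0]*n; for (k, v) in items: if 0 <= k < n: degree_list[k] = len(v)
def constructDegreeList_alt (neighbor_set : List (Int × List Int)) (total_node_num : Int) : List Int :=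
  neighbor_set.foldl
    (fun degree_list p =>
      if 0 ≤ p.1 ∧ p.1 < total_node_num then
        degree_list.set p.1.toNat (p.2.length : Int)
      else
        degree_list)
    (List.replicate total_node_num.toNat 0)

-- ===== PRECONDITION & SPEC =====
-- Pre_ excludes association lists with duplicate keys, which a Python dict can never contain:
-- there A's first-match lookup and B's sequential overwrite are both accidental.
def Pre_constructDegreeList (neighbor_set : List (Int × List Int)) (total_node_num : Int) : Prop :=
  (neighbor_set.map Prod.fst).Nodup
instance (neighbor_set : List (Int × List Int)) (total_node_num : Int) : Decidable (Pre_constructDegreeList neighbor_set total_node_num) := by unfold Pre_constructDegreeList; infer_instance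
def pvWitness_constructDegreeList : (List (Int × List Int)) × Int := ([(0, [5, 6]), (2, [7])], 4)

def Spec_constructDegreeList (neighbor_set : List (Int × List Int)) (total_node_num : Int) (out : List Int) : Prop := out = constructDegreeList_alt neighbor_set total_node_num
instance (neighbor_set : List (Int × List Int)) (total_node_num : Int) (out : List Int) : Decidable (Spec_constructDegreeList neighbor_set total_node_num out) := by unfold Spec_constructDegreeList; infer_instance

-- ===== CLAIM (what is proved, stated in full; the proofs are below) =====
def Claim_equal_constructDegreeList : Prop := ∀ (neighbor_set : List (Int × List Int)) (total_node_num : Int), Dom_constructDegreeList neighbor_set total_node_num → Pre_constructDegreeList neighbor_set total_node_num → Spec_constructDegreeList neighbor_set total_node_num (constructDegreeList neighbor_set total_node_num)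

-- ===== LEMMAS AND PROOFS =====

-- B's scatter preserves the length of the accumulator.
theorem scatter_length (ns : List (Int × List Int)) (n : Int) (l : List Int) :
    (ns.foldl (fun dl p => if 0 ≤ p.1 ∧ p.1 < n then dl.set p.1.toNat (p.2.length : Int) else dl) l).length = l.length := by
  induction ns generalizing l with
  | nil => rfl
  | cons p rest ih =>
    simp only [List.foldl_cons]
    split_ifs <;> simp [ih]

-- element i of B's scatter result: the looked-up length if the (nodup) key ↑i occurs, else the initial value.
theorem scatter_getElem? (ns : List (Int × List Int)) (n : Int) (l : List Int)
    (hnd : (ns.map Prod.fst).Nodup) (hlen : l.length = n.toNat) (i : Nat) (hi : i < l.length) :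
    (ns.foldl (fun dl p => if 0 ≤ p.1 ∧ p.1 < n then dl.set p.1.toNat (p.2.length : Int) else dl) l)[i]?
      = some ((((PySem.Dict.mk ns).get? (i : Int)).map (fun v => (v.length : Int))).getD (l[i]'hi)) := by
  induction ns generalizing l with
  | nil => simp [PySem.Dict.get?, hi]
  | cons p rest ih =>
    obtain ⟨k, v⟩ := p
    simp only [List.map_cons, List.nodup_cons] at hnd
    obtain ⟨hk, hnd'⟩ := hnd
    simp only [List.foldl_cons]
    rw [PySem.Dict.get?_mk_cons]
    by_cases hki : k = (i : Int)
    · have hguard : 0 ≤ k ∧ k < n := ⟨by omega, by omega⟩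
      have hnone : (PySem.Dict.mk rest).get? (i : Int) = none := by
        rw [PySem.Dict.get?_eq_none_iff_not_mem_keys]
        simpa [PySem.Dict.keys, hki] using hk
      have hbeq : (k == (i : Int)) = true := by simp [hki]
      rw [hbeq, if_pos hguard]
      rw [ih (l.set k.toNat (v.length : Int)) hnd' (by simpa using hlen) (by simpa using hi)]
      have hidx : k.toNat = (i : Nat) := by omega
      simp [hnone, hidx, List.getElem_set_self]
    · have hbeq : (k == (i : Int)) = false := by simp [hki]
      rw [hbeq]
      simp only [Bool.false_eq_true, if_false]
      split_ifs with hg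
      · have hne : k.toNat ≠ i := by omega
        rw [ih (l.set k.toNat (v.length : Int)) hnd' (by simpa using hlen) (by simpa using hi)]
        simp [List.getElem_set_ne hne]
      · exact ih l hnd' hlen hi

-- A is the map of the gather body over the index range.
theorem gather_eq_map (ns : List (Int × List Int)) (n : Int) :
    constructDegreeList ns n
      = (PySem.List.pyRange 0 n 1).map
          (fun i => if (PySem.Dict.mk ns).contains i then ((((PySem.Dict.mk ns).get? i).getD []).length : Int) else (0 : Int)) := by
  unfold constructDegreeList
  rw [show (fun (degree_list : List Int) (i : Int) =>
        if (PySem.Dict.mk ns).contains i then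
          degree_list ++ [((((PySem.Dict.mk ns).get? i).getD []).length : Int)]
        else degree_list ++ [0])
      = (fun acc i => acc ++ [if (PySem.Dict.mk ns).contains i then ((((PySem.Dict.mk ns).get? i).getD []).length : Int) else 0])
      from by funext acc i; split_ifs <;> rfl]
  rw [PySem.List.foldl_append_singleton_eq_map]
  simp

-- ===== VERDICT (by name: the statement is the Claim_ definition above) =====
theorem constructDegreeList_spec : Claim_equal_constructDegreeList := by
  intro ns n _ hpre
  unfold Spec_constructDegreeList
  have hlenB : (constructDegreeList_alt ns n).length = n.toNat := by
    unfold constructDegreeList_alt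
    rw [scatter_length]; simp
  have hlenA : (constructDegreeList ns n).length = n.toNat := by
    rw [gather_eq_map]
    simp [PySem.List.length_pyRange_one]
  apply List.ext_getElem?
  intro i
  by_cases hi : i < n.toNat
  · have hA : (constructDegreeList ns n)[i]?
        = some (if (PySem.Dict.mk ns).contains (i : Int) then ((((PySem.Dict.mk ns).get? (i : Int)).getD []).length : Int) else 0) := by
      rw [gather_eq_map]
      rw [List.getElem?_map]
      rw [PySem.List.getElem?_pyRange_one]
      simp [hi]
    have hB := scatter_getElem? ns n (List.replicate n.toNat 0) hpre (by simp) i (by simpa using hi)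
    rw [hA]
    unfold constructDegreeList_alt
    rw [hB]
    rw [PySem.Dict.contains_eq_isSome_get?]
    cases hg : (PySem.Dict.mk ns).get? (i : Int) with
    | none => simp [List.getElem_replicate]
    | some v => simp
  · rw [List.getElem?_eq_none (by omega), List.getElem?_eq_none (by omega)]
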